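-- pv_equiv track=rewrite | github.com/aviswerdlow/k4 | 07_TOOLS/fork_k/keystream_mappers.py | direct_concatenation
-- ===== SOURCE A (Python) =====
-- from typing import List, Dict, Tuple
--
-- def direct_concatenation(berlin: List[int], urania: List[int],
--                         params: Dict) -> List[int]:
--     """
--     K.4.1 - Direct concatenation with looping
--     Concatenate B[0..23] + U[0..23] → 48 values, repeat to 97
--     """
--     # Normalize inputs to 0-25 range
--     berlin_norm = [b % 26 for b in berlin]
--     urania_norm = [u % 26 for u in urania]
--
--     # Concatenate
--     combined = berlin_norm + urania_norm  # 48 elements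
--
--     # Extend to 97 with optional jitter
--     jitter = params.get('jitter', 0)
--     keystream = []
--
--     for loop_idx in range(3):  # Need 3 loops to cover 97
--         for i, val in enumerate(combined):
--             if len(keystream) >= 97:
--                 break
--             # Add jitter per loop
--             jittered_val = (val + loop_idx * jitter) % 26
--             keystream.append(jittered_val)
--
--     return keystream[:97]
-- ===== SOURCE B (Python) =====
-- from typing import List, Dict
--
-- def direct_concatenation(berlin: List[int], urania: List[int],
--                          params: Dict) -> List[int]:
--     combined = [b % 26 for b in berlin] + [u % 26 for u in urania]
--     L = len(combined)
--     n = min(3 * L, 97)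
--     jitter = params.get('jitter', 0)
--     return [(combined[j % L] + (j // L) * jitter) % 26 for j in range(n)]
-- ===== Notes on version B (the rewrite author's own statement) =====
-- stated objective: simpler
-- what changed: Replaces A's three-pass nested loop with a break/length guard and a trailing [:97] slice by a single comprehension over range(min(3*len(combined),97)) that reads combined[j % L] and derives the per-loop jitter from j // L in closed form.
import Mathlib
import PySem

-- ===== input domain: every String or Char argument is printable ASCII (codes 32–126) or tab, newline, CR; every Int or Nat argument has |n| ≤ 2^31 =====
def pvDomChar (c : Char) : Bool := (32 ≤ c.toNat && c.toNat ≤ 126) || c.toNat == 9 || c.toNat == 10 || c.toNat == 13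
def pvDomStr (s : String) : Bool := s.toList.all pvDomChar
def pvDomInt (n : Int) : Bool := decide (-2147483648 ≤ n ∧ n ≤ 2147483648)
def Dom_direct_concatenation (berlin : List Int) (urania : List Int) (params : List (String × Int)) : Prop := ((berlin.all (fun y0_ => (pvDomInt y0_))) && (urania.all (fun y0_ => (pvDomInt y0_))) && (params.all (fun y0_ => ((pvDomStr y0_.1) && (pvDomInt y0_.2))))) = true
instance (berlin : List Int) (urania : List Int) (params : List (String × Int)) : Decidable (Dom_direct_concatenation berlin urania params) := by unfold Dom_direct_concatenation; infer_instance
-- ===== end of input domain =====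

-- B replaces A's nested loop-with-break and trailing slice by one indexed comprehension (same cost, simpler).
-- ===== PORT A =====
def direct_concatenation (berlin : List Int) (urania : List Int) (params : List (String × Int)) : List Int :=
  let berlin_norm := berlin.map (fun b => PySem.Int.mod b 26)
  let urania_norm := urania.map (fun u => PySem.Int.mod u 26)
  let combined := berlin_norm ++ urania_norm
  let jitter := (PySem.Dict.ofList params).getD "jitter" 0
  let keystream := (PySem.List.pyRange 0 3 1).foldl (fun ks loop_idx =>
    (PySem.List.enumerate combined).foldl (fun ks p =>
      if 97 ≤ ks.length then ks
      else ks ++ [PySem.Int.mod (p.2 + loop_idx * jitter) 26]) ks) []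
  PySem.List.slice keystream none (some 97)

-- ===== PORT B =====
def direct_concatenation_alt (berlin : List Int) (urania : List Int) (params : List (String × Int)) : List Int :=
  let combined := berlin.map (fun b => PySem.Int.mod b 26) ++ urania.map (fun u => PySem.Int.mod u 26)
  let L : Int := combined.length
  let n : Int := min (3 * L) 97
  let jitter := (PySem.Dict.ofList params).getD "jitter" 0
  -- combined[j % L]: always in range in Source B (n > 0 forces L > 0); pyGetD's default 0 is unreachable
  (PySem.List.pyRange 0 n 1).map (fun j =>
    PySem.Int.mod (PySem.List.pyGetD combined (PySem.Int.mod j L) 0 + PySem.Int.floordiv j L * jitter) 26)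

-- ===== PRECONDITION & SPEC =====
def Spec_direct_concatenation (berlin : List Int) (urania : List Int) (params : List (String × Int)) (out : List Int) : Prop := out = direct_concatenation_alt berlin urania params
instance (berlin : List Int) (urania : List Int) (params : List (String × Int)) (out : List Int) : Decidable (Spec_direct_concatenation berlin urania params out) := by unfold Spec_direct_concatenation; infer_instance

-- ===== CLAIM (what is proved, stated in full; the proofs are below) =====
def Claim_equal_direct_concatenation : Prop := ∀ (berlin : List Int) (urania : List Int) (params : List (String × Int)), Dom_direct_concatenation berlin urania params → Spec_direct_concatenation berlin urania params (direct_concatenation berlin urania params)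

-- ===== LEMMAS AND PROOFS =====

-- the three jitter blocks, concatenated: loop k contributes c.map (fun v => (v + k*t) % 26)
def pvBlocks (c : List Int) (t : Int) : List Int :=
  c.map (fun v => PySem.Int.mod (v + 0 * t) 26) ++
  c.map (fun v => PySem.Int.mod (v + 1 * t) 26) ++
  c.map (fun v => PySem.Int.mod (v + 2 * t) 26)

-- A's inner loop with the length-97 cap appends the first (97 - |ks|) mapped values
theorem pv_capfold {α : Type} (f : α → Int) (l : List α) (ks : List Int) :
    l.foldl (fun acc p => if 97 ≤ acc.length then acc else acc ++ [f p]) ks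
      = ks ++ (l.take (97 - ks.length)).map f := by
  induction l generalizing ks with
  | nil => simp
  | cons p l ih =>
    simp only [List.foldl_cons]
    by_cases h : 97 ≤ ks.length
    · rw [if_pos h, ih]
      have h0 : 97 - ks.length = 0 := by omega
      simp [h0]
    · rw [if_neg h, ih]
      have h1 : 97 - ks.length = (97 - (ks.length + 1)) + 1 := by omega
      have h2 : (ks ++ [f p]).length = ks.length + 1 := by simp
      rw [h2, h1, List.take_succ_cons]
      simp

-- one pass of A's outer loop, as take-of-map
theorem pv_inner (c : List Int) (k t : Int) (ks : List Int) :
    (PySem.List.enumerate c).foldl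
        (fun acc p => if 97 ≤ acc.length then acc
          else acc ++ [PySem.Int.mod (p.2 + k * t) 26]) ks
      = ks ++ (c.map (fun v => PySem.Int.mod (v + k * t) 26)).take (97 - ks.length) := by
  rw [pv_capfold (fun p => PySem.Int.mod (p.2 + k * t) 26) (PySem.List.enumerate c) ks]
  rw [List.map_take]
  congr 2
  have hc : (fun p : Int × Int => PySem.Int.mod (p.2 + k * t) 26)
      = (fun v => PySem.Int.mod (v + k * t) 26) ∘ (fun p : Int × Int => p.2) := rfl
  rw [hc, ← List.map_map, PySem.List.map_snd_enumerate]

-- capped append chains compose into one take of the concatenation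
theorem pv_take_chain (X Y : List Int) (n : Nat) :
    X.take n ++ Y.take (n - (X.take n).length) = (X ++ Y).take n := by
  rw [List.take_append]
  congr 2
  simp only [List.length_take]
  omega

-- A's whole loop nest followed by [:97] equals the first 97 entries of the three blocks
theorem pv_aside (c : List Int) (t : Int) :
    PySem.List.slice
      ((PySem.List.pyRange 0 3 1).foldl (fun ks loop_idx =>
        (PySem.List.enumerate c).foldl (fun acc p => if 97 ≤ acc.length then acc
          else acc ++ [PySem.Int.mod (p.2 + loop_idx * t) 26]) ks) [])
      none (some 97)
      = (pvBlocks c t).take 97 := by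
  have hr : PySem.List.pyRange 0 3 1 = [0, 1, 2] := by decide
  rw [hr]
  simp only [List.foldl_cons, List.foldl_nil]
  rw [pv_inner, pv_inner, pv_inner]
  rw [PySem.List.slice_to _ (by norm_num : (0:Int) ≤ 97)]
  simp only [List.nil_append, List.length_nil, Nat.sub_zero]
  rw [pv_take_chain, pv_take_chain]
  rw [show ((97:Int)).toNat = 97 from rfl, List.take_take]
  simp [pvBlocks]

-- B's indexed comprehension equals the same first-97 prefix
theorem pv_bside (c : List Int) (t : Int) :
    (PySem.List.pyRange 0 (min (3 * (c.length : Int)) 97) 1).map (fun j =>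
        PySem.Int.mod (PySem.List.pyGetD c (PySem.Int.mod j (c.length : Int)) 0
          + PySem.Int.floordiv j (c.length : Int) * t) 26)
      = (pvBlocks c t).take 97 := by
  rw [PySem.List.pyRange_one]
  rw [List.map_map]
  have hN : (min (3 * (c.length : Int)) 97 - 0).toNat = min (3 * c.length) 97 := by omega
  rw [hN]
  apply List.ext_getElem
  · simp only [List.length_map, List.length_range, List.length_take, List.length_append,
      pvBlocks]
    omega
  · intro i h1 h2
    simp only [List.getElem_map, List.getElem_range, Function.comp_apply]
    have hi : i < min (3 * c.length) 97 := by simpa using h1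
    have hL : 0 < c.length := by omega
    have hmlt : i % c.length < c.length := Nat.mod_lt i hL
    simp only [zero_add, PySem.Int.mod_natCast, PySem.Int.floordiv_natCast,
      PySem.List.pyGetD_natCast]
    rw [List.getElem_take]
    rw [List.getD_eq_getElem _ _ hmlt]
    simp only [pvBlocks, List.getElem_append, List.length_map, List.length_append,
      List.getElem_map]
    split_ifs with o1 o2
    · have hm : i % c.length = i := Nat.mod_eq_of_lt o2
      have hd : i / c.length = 0 := Nat.div_eq_of_lt o2
      simp [hm, hd]
    · have hm : i % c.length = i - c.length := by
        conv_lhs => rw [show i = (i - c.length) + c.length by omega]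
        rw [Nat.add_mod_right, Nat.mod_eq_of_lt (by omega)]
      have hd : i / c.length = 1 := by
        conv_lhs => rw [show i = (i - c.length) + c.length by omega]
        rw [Nat.add_div_right _ hL, Nat.div_eq_of_lt (by omega)]
      simp [hm, hd]
    · have hm : i % c.length = i - (c.length + c.length) := by
        conv_lhs => rw [show i = (i - (c.length + c.length)) + c.length + c.length by omega]
        rw [Nat.add_mod_right, Nat.add_mod_right, Nat.mod_eq_of_lt (by omega)]
      have hd : i / c.length = 2 := by
        conv_lhs => rw [show i = (i - (c.length + c.length)) + c.length + c.length by omega]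
        rw [Nat.add_div_right _ hL, Nat.add_div_right _ hL, Nat.div_eq_of_lt (by omega)]
      simp [hm, hd]

-- ===== VERDICT (by name: the statement is the Claim_ definition above) =====
theorem direct_concatenation_spec : Claim_equal_direct_concatenation := by
  intro berlin urania params _
  unfold Spec_direct_concatenation direct_concatenation direct_concatenation_alt
  dsimp only
  rw [pv_aside, pv_bside]
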